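-- pv_equiv track=rewrite | github.com/Niki-3D/Natural-language-processing | src/logic/preprocessor.py | alphabetically_sort_and_sum_up_strings
-- ===== SOURCE A (Python) =====
-- def alphabetically_sort_and_sum_up_strings(data_dict):
--     sorted_dict = {}
--     for key in data_dict.keys():
--         names = key.split()
--         names.sort()
--         sorted_key = ' '.join(names)
--         if sorted_key in sorted_dict:
--             sorted_dict[sorted_key] += data_dict[key]
--         else:
--             sorted_dict[sorted_key] = data_dict[key]
--
--     return sorted_dict
-- ===== SOURCE B (Python) =====
-- def alphabetically_sort_and_sum_up_strings(data_dict):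
--     pairs = [(' '.join(sorted(k.split())), v) for k, v in data_dict.items()]
--     return {k: sum(v for k2, v in pairs if k2 == k)
--             for k in dict.fromkeys(k for k, _ in pairs)}
-- ===== Notes on version B (the rewrite author's own statement) =====
-- stated objective: alternative
-- what changed: Replaced A's single scan that accumulates into a dict with membership tests by a canonicalize-everything pass, an ordered key dedup (dict.fromkeys), and a per-key sum comprehension over the canonicalized pairs.
import Mathlib
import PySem

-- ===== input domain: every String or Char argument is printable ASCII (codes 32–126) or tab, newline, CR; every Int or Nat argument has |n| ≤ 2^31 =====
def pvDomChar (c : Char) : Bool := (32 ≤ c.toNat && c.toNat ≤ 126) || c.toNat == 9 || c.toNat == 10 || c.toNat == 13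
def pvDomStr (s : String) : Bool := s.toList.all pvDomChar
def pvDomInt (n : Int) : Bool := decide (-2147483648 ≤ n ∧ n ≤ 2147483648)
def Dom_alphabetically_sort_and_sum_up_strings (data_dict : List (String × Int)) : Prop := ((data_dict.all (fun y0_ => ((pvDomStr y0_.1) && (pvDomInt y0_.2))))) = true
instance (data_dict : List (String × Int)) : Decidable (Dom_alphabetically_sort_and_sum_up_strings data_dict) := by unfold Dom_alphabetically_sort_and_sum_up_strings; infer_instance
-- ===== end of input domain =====

-- B replaces A's accumulate-into-dict scan by canonicalize-all + ordered key dedup + per-key sums (alternative decomposition, same results).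


-- ===== PORT A =====
-- for key in data_dict.keys(): build sorted_key; accumulate into sorted_dict
def alphabetically_sort_and_sum_up_strings (data_dict : List (String × Int)) : List (String × Int) :=
  let d := PySem.Dict.mk data_dict
  (d.keys.foldl (fun (sorted_dict : PySem.Dict String Int) key =>
      let names := PySem.Str.split₀ key
      let names := PySem.List.sorted names (fun x => x) false
      let sorted_key := PySem.Str.join " " names
      if sorted_dict.contains sorted_key then
        sorted_dict.insert sorted_key (sorted_dict.getD sorted_key 0 + d.getD key 0)
      else
        sorted_dict.insert sorted_key (d.getD key 0)) PySem.Dict.empty).items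

-- ===== PORT B =====
def alphabetically_sort_and_sum_up_strings_alt (data_dict : List (String × Int)) : List (String × Int) :=
  let pairs := data_dict.map (fun kv =>
    (PySem.Str.join " " (PySem.List.sorted (PySem.Str.split₀ kv.1) (fun x => x) false), kv.2))
  (PySem.List.dedup (pairs.map (fun kv => kv.1))).map (fun k =>
    (k, ((pairs.filter (fun kv => kv.1 == k)).map (fun kv => kv.2)).sum))

-- ===== PRECONDITION & SPEC =====
-- Pre_ excludes association lists with duplicate keys: they do not represent a Python dict,
-- which is A's input type (a Python dict never has two equal keys).
def Pre_alphabetically_sort_and_sum_up_strings (data_dict : List (String × Int)) : Prop :=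
  (data_dict.map Prod.fst).Nodup
instance (data_dict : List (String × Int)) : Decidable (Pre_alphabetically_sort_and_sum_up_strings data_dict) := by unfold Pre_alphabetically_sort_and_sum_up_strings; infer_instance
def pvWitness_alphabetically_sort_and_sum_up_strings : (List (String × Int)) := [("b a", 1), ("a b", 2), ("c", 5)]
def Spec_alphabetically_sort_and_sum_up_strings (data_dict : List (String × Int)) (out : List (String × Int)) : Prop := out = alphabetically_sort_and_sum_up_strings_alt data_dict
instance (data_dict : List (String × Int)) (out : List (String × Int)) : Decidable (Spec_alphabetically_sort_and_sum_up_strings data_dict out) := by unfold Spec_alphabetically_sort_and_sum_up_strings; infer_instance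

-- ===== CLAIM (what is proved, stated in full; the proofs are below) =====
def Claim_equal_alphabetically_sort_and_sum_up_strings : Prop := ∀ (data_dict : List (String × Int)), Dom_alphabetically_sort_and_sum_up_strings data_dict → Pre_alphabetically_sort_and_sum_up_strings data_dict → Spec_alphabetically_sort_and_sum_up_strings data_dict (alphabetically_sort_and_sum_up_strings data_dict)

-- ===== LEMMAS AND PROOFS =====
-- the canonical key of an original key
def pvCanon (k : String) : String :=
  PySem.Str.join " " (PySem.List.sorted (PySem.Str.split₀ k) (fun x => x) false)

-- A's loop step, rewritten with the branch pushed inside the insert value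
theorem pvStep_eq (sd : PySem.Dict String Int) (k : String) (v : Int) :
    (if sd.contains (pvCanon k) then
       sd.insert (pvCanon k) (sd.getD (pvCanon k) 0 + v)
     else sd.insert (pvCanon k) v)
    = sd.insert (pvCanon k) (sd.getD (pvCanon k) 0 + v) := by
  by_cases h : sd.contains (pvCanon k) = true
  · simp [h]
  · simp only [Bool.not_eq_true] at h
    simp [h, PySem.Dict.getD_of_not_contains sd 0 h]

-- getD of the accumulating fold: running sum of the matching values
theorem pvGetD_fold (l : List (String × Int)) (d : PySem.Dict String Int) (k : String) :
    (l.foldl (fun sd kv => sd.insert (pvCanon kv.1) (sd.getD (pvCanon kv.1) 0 + kv.2)) d).getD k 0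
    = d.getD k 0 + ((l.filter (fun kv => pvCanon kv.1 == k)).map (fun kv => kv.2)).sum := by
  induction l generalizing d with
  | nil => simp
  | cons x t ih =>
    simp only [List.foldl_cons, ih, List.filter_cons]
    rw [PySem.Dict.getD_insert]
    by_cases h : k = pvCanon x.1
    · simp only [h, BEq.rfl, if_true, List.map_cons, List.sum_cons]
      ring
    · have h2 : ¬pvCanon x.1 = k := Ne.symm h
      have h' : (pvCanon x.1 == k) = false := by simp [h2]
      simp [h, h']

theorem alphabetically_sort_and_sum_up_strings_spec : Claim_equal_alphabetically_sort_and_sum_up_strings := by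
  intro data_dict _ hpre
  unfold Spec_alphabetically_sort_and_sum_up_strings
  unfold alphabetically_sort_and_sum_up_strings alphabetically_sort_and_sum_up_strings_alt
  unfold Pre_alphabetically_sort_and_sum_up_strings at hpre
  simp only
  -- keys of the literal dict are the first components; lookups return the paired value
  have hkeys : (PySem.Dict.mk data_dict).keys = data_dict.map Prod.fst := rfl
  have hgetD : ∀ kv ∈ data_dict, (PySem.Dict.mk data_dict).getD kv.1 0 = kv.2 := by
    intro kv hmem
    exact PySem.Dict.getD_of_mem_items (k := kv.1) (v := kv.2) (d := PySem.Dict.mk data_dict)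
      (by simpa using hmem) (by simpa [PySem.Dict.keys] using hpre) 0
  -- turn the loop over keys into a loop over the pairs, with the value in hand
  rw [hkeys, List.foldl_map]
  have hfold :
      data_dict.foldl (fun (sd : PySem.Dict String Int) kv =>
        if sd.contains (pvCanon kv.1) then
          sd.insert (pvCanon kv.1) (sd.getD (pvCanon kv.1) 0 + (PySem.Dict.mk data_dict).getD kv.1 0)
        else sd.insert (pvCanon kv.1) ((PySem.Dict.mk data_dict).getD kv.1 0)) PySem.Dict.empty
      = data_dict.foldl (fun (sd : PySem.Dict String Int) kv =>
          sd.insert (pvCanon kv.1) (sd.getD (pvCanon kv.1) 0 + kv.2)) PySem.Dict.empty := by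
    apply PySem.List.foldl_congr_mem
    intro sd kv hmem
    rw [hgetD kv hmem, pvStep_eq]
  have hc : ∀ s, PySem.Str.join " " (PySem.List.sorted (PySem.Str.split₀ s) (fun x => x) false) = pvCanon s := fun _ => rfl
  simp only [hc]
  rw [hfold]
  -- the result dict: its items are its (deduped) keys paired with the accumulated sums
  set F := data_dict.foldl (fun (sd : PySem.Dict String Int) kv =>
      sd.insert (pvCanon kv.1) (sd.getD (pvCanon kv.1) 0 + kv.2)) PySem.Dict.empty with hF
  have hnodup : F.keys.Nodup := by
    apply PySem.Dict.nodup_keys_foldl_insert_key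
    exact PySem.Dict.nodup_keys_empty
  have hFkeys : F.keys = PySem.List.dedup (data_dict.map (fun kv => pvCanon kv.1)) := by
    rw [hF, PySem.Dict.keys_foldl_insert_key]
    simp [PySem.Dict.keys_empty, PySem.Set.update_nil_left, PySem.List.dedup_eq_ofList]
  rw [show F.items = F.keys.map (fun k => (k, F.getD k 0)) from
      PySem.Dict.items_eq_map_keys F hnodup 0]
  rw [hFkeys]
  simp only [List.map_map, Function.comp_def, List.filter_map]
  apply List.map_congr_left
  intro k hk
  rw [hF, pvGetD_fold]
  simp [PySem.Dict.getD_empty]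

-- ===== VERDICT (by name: the statement is the Claim_ definition above) =====
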